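-- pv_equiv track=rewrite | github.com/MD-Zubayer/newsmartagent-produnction | jwtauth/aiAgent/data_processor.py | prepare_vactor_data
-- ===== SOURCE A (Python) =====
-- def prepare_vactor_data(grid_data):
--     headers = {}
--
--     for key, value in grid_data.items():
--         if key.startswith('0-'):
--             col_idx = key.split('-')[1]
--             headers[col_idx] = value.replace("*", "").strip()
--     row_sentences = {}
--     for key, value in grid_data.items():
--         r_idx, c_idx = key.split('-')
--         if r_idx == "0": continue
--
--         if r_idx not in row_sentences:
--             row_sentences[r_idx] = []
--
--         col_name = headers.get(c_idx, f"col_{c_idx}")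
--         if value.strip():
--             row_sentences[r_idx].append(f"{col_name.capitalize()}: {value}")
--
--     return {r: ", ".join(parts) for r, parts in row_sentences.items()}
-- ===== SOURCE B (Python) =====
-- def prepare_vactor_data(grid_data):
--     # Scan-based alternative: no header/bucket dicts; distinct data rows are collected
--     # in first-occurrence order, then each row's sentence is produced by rescanning
--     # grid_data, with the header for a column looked up by scanning for key '0-'+col.
--     items = list(grid_data.items())
--
--     def header(c):
--         for k, v in items:
--             if k == '0-' + c:
--                 return v.replace('*', '').strip()
--         return 'col_' + c
--
--     seen = []
--     for k, v in items:
--         r = k.split('-')[0]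
--         if r != '0' and r not in seen:
--             seen.append(r)
--
--     def sentence(r):
--         parts = []
--         for k, v in items:
--             rr, cc = k.split('-')
--             if rr == r and v.strip():
--                 parts.append(f"{header(cc).capitalize()}: {v}")
--         return ", ".join(parts)
--
--     # seen is duplicate-free, so this comprehension is a plain ordered build
--     return {r: sentence(r) for r in seen}
-- ===== Notes on version B (the rewrite author's own statement) =====
-- stated objective: alternative
-- what changed: Drops A's header dict and per-row bucket dict entirely: B collects the distinct data-row ids in first-occurrence order, then builds each row's sentence by rescanning grid_data and resolving each column header by a direct scan for key '0-'+col (nested scans instead of dict grouping).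
import Mathlib
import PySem

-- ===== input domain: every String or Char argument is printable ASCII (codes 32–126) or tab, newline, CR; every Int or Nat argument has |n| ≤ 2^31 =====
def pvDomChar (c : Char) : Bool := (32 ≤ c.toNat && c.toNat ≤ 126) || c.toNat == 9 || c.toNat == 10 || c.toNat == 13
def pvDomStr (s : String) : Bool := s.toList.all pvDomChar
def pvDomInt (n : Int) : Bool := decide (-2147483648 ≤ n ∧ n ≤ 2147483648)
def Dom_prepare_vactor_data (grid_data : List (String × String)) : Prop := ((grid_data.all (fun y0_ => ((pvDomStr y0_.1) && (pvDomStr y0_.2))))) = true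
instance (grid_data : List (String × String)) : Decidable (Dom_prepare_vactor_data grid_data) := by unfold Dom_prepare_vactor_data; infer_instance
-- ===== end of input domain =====

-- B drops A's header dict and per-row bucket dict: it collects the distinct data-row ids in
-- first-occurrence order and builds each row's sentence by rescanning grid_data, resolving each
-- column header by a direct scan for the key '0-'+col (objective: alternative; not faster).

-- shared helper: str.capitalize — hand-ported (no PySem primitive); exact on the ASCII domain,
-- where Python titlecases the first character (= uppercases it) and lowercases the rest
def pvCap (cs : List Char) : List Char :=
  match cs with
  | [] => []
  | c :: rest => PySem.Chars.upperChar c :: PySem.Chars.lower rest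

-- ===== PORT A =====
-- first loop of A: build headers from '0-' keys
def pvStepA1 (h : PySem.Dict (List Char) (List Char)) (kv : String × String) :
    PySem.Dict (List Char) (List Char) :=
  if PySem.Chars.startswith kv.1.toList ['0', '-'] then
    h.insert ((PySem.Chars.splitOn kv.1.toList ['-']).getD 1 [])
      (PySem.Chars.strip (PySem.Chars.replace kv.2.toList ['*'] []))
  else h

-- second loop of A: build the formatted row sentences (headers already complete)
def pvStepA2 (headers : PySem.Dict (List Char) (List Char))
    (d : PySem.Dict (List Char) (List (List Char))) (kv : String × String) :
    PySem.Dict (List Char) (List (List Char)) :=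
  let parts := PySem.Chars.splitOn kv.1.toList ['-']
  let r := parts.getD 0 []
  let c := parts.getD 1 []
  if r = ['0'] then d
  else
    let d := if d.contains r then d else d.insert r []
    let colName := headers.getD c (['c', 'o', 'l', '_'] ++ c)
    if PySem.Chars.strip kv.2.toList ≠ [] then
      d.modify r [] (· ++ [pvCap colName ++ [':', ' '] ++ kv.2.toList])
    else d

def prepare_vactor_data (grid_data : List (String × String)) : List (String × String) :=
  let headers := grid_data.foldl pvStepA1 PySem.Dict.empty
  let row_sentences := grid_data.foldl (pvStepA2 headers) PySem.Dict.empty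
  row_sentences.items.map (fun p => (String.ofList p.1, String.ofList (PySem.Chars.join [',', ' '] p.2)))

-- ===== PORT B =====
-- B's header(c): scan the items for the key '0-'+c
def pvHeaderB (items : List (String × String)) (c : List Char) : List Char :=
  match items.find? (fun kv => kv.1.toList == '0' :: '-' :: c) with
  | some kv => PySem.Chars.strip (PySem.Chars.replace kv.2.toList ['*'] [])
  | none => ['c', 'o', 'l', '_'] ++ c

-- B's first loop: distinct data-row ids in first-occurrence order
def pvSeenStep (seen : List (List Char)) (kv : String × String) : List (List Char) :=
  let r := (PySem.Chars.splitOn kv.1.toList ['-']).getD 0 []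
  if r ≠ ['0'] ∧ r ∉ seen then seen ++ [r] else seen

-- B's sentence(r): rescan the items for row r's kept cells
def pvSentence (items : List (String × String)) (r : List Char) : List Char :=
  PySem.Chars.join [',', ' ']
    (items.foldl (fun acc kv =>
      if ((PySem.Chars.splitOn kv.1.toList ['-']).getD 0 [] == r)
          && (PySem.Chars.strip kv.2.toList != []) then
        acc ++ [pvCap (pvHeaderB items ((PySem.Chars.splitOn kv.1.toList ['-']).getD 1 []))
                  ++ [':', ' '] ++ kv.2.toList]
      else acc) [])

def prepare_vactor_data_alt (grid_data : List (String × String)) : List (String × String) :=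
  let seen := grid_data.foldl pvSeenStep []
  -- Source B's final dict comprehension over the duplicate-free 'seen' is a plain ordered build
  seen.map (fun r => (String.ofList r, String.ofList (pvSentence grid_data r)))

-- ===== PRECONDITION & SPEC =====
-- Pre_ excludes exactly the inputs on which A raises: a key whose split('-') does not unpack into
-- two parts (ValueError), i.e. any key without exactly one '-'; the Nodup conjunct only states the
-- key-uniqueness invariant of the Python dict argument (no Python-reachable input is excluded by it).
def Pre_prepare_vactor_data (grid_data : List (String × String)) : Prop :=
  (∀ p ∈ grid_data, p.1.toList.count '-' = 1) ∧ (grid_data.map Prod.fst).Nodup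
instance (grid_data : List (String × String)) : Decidable (Pre_prepare_vactor_data grid_data) := by
  unfold Pre_prepare_vactor_data; infer_instance

def pvWitness_prepare_vactor_data : (List (String × String)) :=
  [("0-1", "*Name* "), ("1-1", "Alice"), ("2-1", "")]

def Spec_prepare_vactor_data (grid_data : List (String × String)) (out : List (String × String)) : Prop := out = prepare_vactor_data_alt grid_data
instance (grid_data : List (String × String)) (out : List (String × String)) : Decidable (Spec_prepare_vactor_data grid_data out) := by unfold Spec_prepare_vactor_data; infer_instance

-- ===== CLAIM (what is proved, stated in full; the proofs are below) =====
def Claim_equal_prepare_vactor_data : Prop := ∀ (grid_data : List (String × String)), Dom_prepare_vactor_data grid_data → Pre_prepare_vactor_data grid_data → Spec_prepare_vactor_data grid_data (prepare_vactor_data grid_data)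

-- ===== LEMMAS AND PROOFS =====

def pvRowOf (kv : String × String) : List Char := (PySem.Chars.splitOn kv.1.toList ['-']).getD 0 []
def pvColOf (kv : String × String) : List Char := (PySem.Chars.splitOn kv.1.toList ['-']).getD 1 []
def pvFmtA (H : PySem.Dict (List Char) (List Char)) (kv : String × String) : List Char :=
  pvCap (H.getD (pvColOf kv) (['c', 'o', 'l', '_'] ++ pvColOf kv)) ++ [':', ' '] ++ kv.2.toList
def pvKeep (r : List Char) (kv : String × String) : Bool :=
  (pvRowOf kv == r) && (PySem.Chars.strip kv.2.toList != [])

lemma pv_go_no (l : List Char) : ∀ (fuel : Nat) (cur : List Char) (acc : List (List Char)),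
    l.length ≤ fuel → '-' ∉ l →
    PySem.Chars.splitOn.go ['-'] fuel l cur acc = ((cur.reverse ++ l) :: acc).reverse := by
  induction l with
  | nil =>
    intro fuel cur acc _ _
    cases fuel <;> simp [PySem.Chars.splitOn.go]
  | cons c rest ih =>
    intro fuel cur acc hlen hmem
    obtain ⟨f, rfl⟩ : ∃ f, fuel = f + 1 := ⟨fuel - 1, by simp at hlen; omega⟩
    have hc : c ≠ '-' := fun h => hmem (h ▸ List.mem_cons_self)
    rw [PySem.Chars.splitOn.go]
    simp only [List.isPrefixOf, Bool.and_true]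
    rw [if_neg (by simp [beq_iff_eq]; exact fun h => hc h.symm)]
    rw [ih f (c :: cur) acc (by simp at hlen ⊢; omega) (fun h => hmem (List.mem_cons_of_mem _ h))]
    simp

lemma pv_go_pair (p0 : List Char) : ∀ (p1 : List Char) (fuel : Nat) (cur : List Char) (acc : List (List Char)),
    (p0 ++ '-' :: p1).length ≤ fuel → '-' ∉ p0 → '-' ∉ p1 →
    PySem.Chars.splitOn.go ['-'] fuel (p0 ++ '-' :: p1) cur acc
      = (p1 :: (cur.reverse ++ p0) :: acc).reverse := by
  induction p0 with
  | nil =>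
    intro p1 fuel cur acc hlen _ h1
    obtain ⟨f, rfl⟩ : ∃ f, fuel = f + 1 := ⟨fuel - 1, by simp at hlen; omega⟩
    simp only [List.nil_append]
    rw [PySem.Chars.splitOn.go]
    rw [if_pos (by simp [List.isPrefixOf])]
    have hdrop : List.drop ['-'].length ('-' :: p1) = p1 := rfl
    rw [hdrop]
    rw [pv_go_no p1 f [] (cur.reverse :: acc) (by simp at hlen ⊢; omega) h1]
    simp
  | cons c rest ih =>
    intro p1 fuel cur acc hlen h0 h1
    obtain ⟨f, rfl⟩ : ∃ f, fuel = f + 1 := ⟨fuel - 1, by simp at hlen; omega⟩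
    have hc : c ≠ '-' := fun h => h0 (h ▸ List.mem_cons_self)
    rw [List.cons_append, PySem.Chars.splitOn.go]
    simp only [List.isPrefixOf, Bool.and_true]
    rw [if_neg (by simp [beq_iff_eq]; exact fun h => hc h.symm)]
    rw [ih p1 f (c :: cur) acc (by simp at hlen ⊢; omega) (fun h => h0 (List.mem_cons_of_mem _ h)) h1]
    simp

lemma pv_splitOn_pair (p0 p1 : List Char) (h0 : '-' ∉ p0) (h1 : '-' ∉ p1) :
    PySem.Chars.splitOn (p0 ++ '-' :: p1) ['-'] = [p0, p1] := by
  rw [PySem.Chars.splitOn, pv_go_pair p0 p1 _ [] [] (by simp) h0 h1]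
  simp

lemma pv_count_one_decomp (cs : List Char) (h : cs.count '-' = 1) :
    ∃ p0 p1, cs = p0 ++ '-' :: p1 ∧ '-' ∉ p0 ∧ '-' ∉ p1 := by
  induction cs with
  | nil => simp at h
  | cons c rest ih =>
    by_cases hc : c = '-'
    · subst hc
      refine ⟨[], rest, rfl, by simp, ?_⟩
      rw [List.count_cons_self] at h
      exact (List.count_eq_zero.mp (by omega))
    · rw [List.count_cons_of_ne (by exact fun h' => hc h')] at h
      obtain ⟨p0, p1, rfl, hp0, hp1⟩ := ih h
      exact ⟨c :: p0, p1, rfl, by simp; exact ⟨fun h' => hc h'.symm, hp0⟩, hp1⟩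

lemma pv_startswith_iff (p0 p1 : List Char) (h0 : '-' ∉ p0) :
    PySem.Chars.startswith (p0 ++ '-' :: p1) ['0', '-'] = true ↔ p0 = ['0'] := by
  match p0 with
  | [] => simp [PySem.Chars.startswith, List.isPrefixOf]
  | [x] =>
    simp [PySem.Chars.startswith, List.isPrefixOf, beq_iff_eq]
    constructor <;> (intro h; exact h.symm)
  | x :: y :: rest =>
    have hy : y ≠ '-' := fun h => h0 (by simp [h])
    simp [PySem.Chars.startswith, List.isPrefixOf, beq_iff_eq]
    intro _ h
    exact absurd h.symm hy

-- keys of A's second fold evolve exactly as B's seen list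
lemma pv_keys_step (H : PySem.Dict (List Char) (List Char))
    (d : PySem.Dict (List Char) (List (List Char))) (kv : String × String) :
    (pvStepA2 H d kv).keys = pvSeenStep d.keys kv := by
  simp only [pvStepA2, pvSeenStep]
  set r := (PySem.Chars.splitOn kv.1.toList ['-']).getD 0 [] with hrdef
  by_cases h0 : r = ['0']
  · rw [if_pos h0, if_neg (show ¬(r ≠ ['0'] ∧ r ∉ d.keys) from fun hc => hc.1 h0)]
  · rw [if_neg h0]
    by_cases hcont : d.contains r = true
    · have hmem := (PySem.Dict.contains_iff_mem_keys d r).mp hcont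
      rw [if_pos hcont, if_neg (show ¬(r ≠ ['0'] ∧ r ∉ d.keys) from fun hc => hc.2 hmem)]
      by_cases hstrip : PySem.Chars.strip kv.2.toList ≠ []
      · rw [if_pos hstrip, PySem.Dict.keys_modify, PySem.Dict.keys_insert_of_contains d _ hcont]
      · rw [if_neg hstrip]
    · have hcf : d.contains r = false := by simpa using hcont
      have hmem : r ∉ d.keys := fun hm => hcont ((PySem.Dict.contains_iff_mem_keys d r).mpr hm)
      rw [if_neg hcont, if_pos (show r ≠ ['0'] ∧ r ∉ d.keys from ⟨h0, hmem⟩)]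
      by_cases hstrip : PySem.Chars.strip kv.2.toList ≠ []
      · rw [if_pos hstrip, PySem.Dict.keys_modify,
            PySem.Dict.keys_insert_of_contains _ _ (PySem.Dict.contains_insert_self d r []),
            PySem.Dict.keys_insert_of_not_contains d _ hcf]
      · rw [if_neg hstrip]
        exact PySem.Dict.keys_insert_of_not_contains d _ hcf

lemma pv_keys_fold (H : PySem.Dict (List Char) (List Char)) (l : List (String × String)) :
    ∀ (d : PySem.Dict (List Char) (List (List Char))),
    (l.foldl (pvStepA2 H) d).keys = l.foldl pvSeenStep d.keys := by
  induction l with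
  | nil => intro d; rfl
  | cons kv rest ih =>
    intro d
    rw [List.foldl_cons, List.foldl_cons, ih, pv_keys_step]

-- seen never contains '0' and stays duplicate-free
lemma pv_seen_ne (l : List (String × String)) :
    ∀ (s : List (List Char)), (∀ x ∈ s, x ≠ ['0']) →
    ∀ r ∈ l.foldl pvSeenStep s, r ≠ ['0'] := by
  induction l with
  | nil => intro s hs r hr; exact hs r hr
  | cons kv rest ih =>
    intro s hs r hr
    refine ih _ ?_ r hr
    simp only [pvSeenStep]
    split_ifs with h
    · intro x hx
      rcases List.mem_append.mp hx with hx | hx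
      · exact hs x hx
      · simp at hx; subst hx; exact h.1
    · exact hs

lemma pv_seen_nodup (l : List (String × String)) :
    ∀ (s : List (List Char)), s.Nodup → (l.foldl pvSeenStep s).Nodup := by
  induction l with
  | nil => intro s hs; exact hs
  | cons kv rest ih =>
    intro s hs
    refine ih _ ?_
    simp only [pvSeenStep]
    split_ifs with h
    · refine List.Nodup.append hs (List.nodup_singleton _) ?_
      rw [List.disjoint_singleton]
      exact h.2
    · exact hs

-- getD of A's second fold: each row accumulates exactly its kept, formatted cells in order
lemma pv_getD_step (H : PySem.Dict (List Char) (List Char))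
    (d : PySem.Dict (List Char) (List (List Char))) (kv : String × String) (r : List Char)
    (hr : r ≠ ['0']) :
    (pvStepA2 H d kv).getD r [] =
      d.getD r [] ++ (if pvKeep r kv then [pvFmtA H kv] else []) := by
  simp only [pvStepA2, pvKeep, pvFmtA, pvRowOf, pvColOf]
  generalize (PySem.Chars.splitOn kv.1.toList ['-']).getD 0 [] = r0
  by_cases h0 : r0 = ['0']
  · rw [if_pos h0]
    have hb : (r0 == r) = false := by
      simp only [beq_eq_false_iff_ne, ne_eq]
      exact fun h => hr (h ▸ h0)
    simp [hb]
  · rw [if_neg h0]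
    have hd1 : (if d.contains r0 = true then d else d.insert r0 []).getD r [] = d.getD r [] := by
      by_cases hcont : d.contains r0 = true
      · rw [if_pos hcont]
      · rw [if_neg hcont]
        by_cases hrr : r = r0
        · subst hrr
          rw [PySem.Dict.getD_insert_self, PySem.Dict.getD_of_not_contains d _ (by simpa using hcont)]
        · exact PySem.Dict.getD_insert_of_ne d _ _ hrr
    by_cases hstrip : PySem.Chars.strip kv.2.toList ≠ []
    · rw [if_pos hstrip]
      by_cases hrr : r = r0
      · subst hrr
        rw [PySem.Dict.getD_modify_self, hd1]
        simp [hstrip]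
      · rw [PySem.Dict.getD_modify_of_ne _ _ _ hrr, hd1]
        have hb : (r0 == r) = false := by
          simp only [beq_eq_false_iff_ne, ne_eq]
          exact fun h => hrr h.symm
        simp [hb]
    · rw [if_neg hstrip, hd1]
      simp [show PySem.Chars.strip kv.2.toList = [] from not_not.mp hstrip]

lemma pv_getD_fold (H : PySem.Dict (List Char) (List Char)) (l : List (String × String)) :
    ∀ (d : PySem.Dict (List Char) (List (List Char))) (r : List Char), r ≠ ['0'] →
    (l.foldl (pvStepA2 H) d).getD r [] = d.getD r [] ++ (l.filter (pvKeep r)).map (pvFmtA H) := by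
  induction l with
  | nil => intro d r hr; simp
  | cons kv rest ih =>
    intro d r hr
    rw [List.foldl_cons, ih _ r hr, pv_getD_step H d kv r hr, List.filter_cons]
    by_cases hk : pvKeep r kv = true
    · simp [hk]
    · simp [hk]

-- A's headers dict looked up at c equals B's scan for the key '0-'+c
lemma pv_stepA1_get?_of_ne (h : PySem.Dict (List Char) (List Char)) (kv : String × String)
    (c : List Char) (hcnt : kv.1.toList.count '-' = 1) (hne : kv.1.toList ≠ '0' :: '-' :: c) :
    (pvStepA1 h kv).get? c = h.get? c := by
  obtain ⟨p0, p1, heq, h0, h1⟩ := pv_count_one_decomp kv.1.toList hcnt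
  simp only [pvStepA1, heq]
  by_cases hsw : PySem.Chars.startswith (p0 ++ '-' :: p1) ['0', '-'] = true
  · have hp0 := (pv_startswith_iff p0 p1 h0).mp hsw
    rw [if_pos hsw, pv_splitOn_pair p0 p1 h0 h1]
    refine PySem.Dict.get?_insert_of_ne h _ ?_
    intro hcp
    exact hne (by rw [heq, hp0]; simp [hcp])
  · rw [if_neg hsw]

lemma pv_header_none (c : List Char) (l : List (String × String)) :
    ∀ (h : PySem.Dict (List Char) (List Char)),
    (∀ kv ∈ l, kv.1.toList.count '-' = 1) →
    (∀ kv ∈ l, kv.1.toList ≠ '0' :: '-' :: c) →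
    (l.foldl pvStepA1 h).get? c = h.get? c := by
  induction l with
  | nil => intro h _ _; rfl
  | cons kv rest ih =>
    intro h hcnt hne
    rw [List.foldl_cons,
        ih _ (fun p hp => hcnt p (List.mem_cons_of_mem _ hp))
          (fun p hp => hne p (List.mem_cons_of_mem _ hp)),
        pv_stepA1_get?_of_ne h kv c (hcnt kv List.mem_cons_self) (hne kv List.mem_cons_self)]

lemma pv_header_fold (c : List Char) (l : List (String × String)) (hc : '-' ∉ c) :
    ∀ (h : PySem.Dict (List Char) (List Char)),
    (∀ kv ∈ l, kv.1.toList.count '-' = 1) → (l.map Prod.fst).Nodup →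
    (l.foldl pvStepA1 h).get? c =
      match l.find? (fun kv => kv.1.toList == '0' :: '-' :: c) with
      | some kv => some (PySem.Chars.strip (PySem.Chars.replace kv.2.toList ['*'] []))
      | none => h.get? c := by
  induction l with
  | nil => intro h _ _; rfl
  | cons kv rest ih =>
    intro h hcnt hnd
    have hcnt' : ∀ p ∈ rest, p.1.toList.count '-' = 1 :=
      fun p hp => hcnt p (List.mem_cons_of_mem _ hp)
    have hnd' : (rest.map Prod.fst).Nodup := (List.nodup_cons.mp (by simpa using hnd)).2
    by_cases hm : kv.1.toList = '0' :: '-' :: c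
    · rw [List.find?_cons_of_pos (by simp [hm])]
      have hstep : pvStepA1 h kv
          = h.insert c (PySem.Chars.strip (PySem.Chars.replace kv.2.toList ['*'] [])) := by
        have heq : kv.1.toList = ['0'] ++ '-' :: c := by simpa using hm
        simp only [pvStepA1, heq]
        rw [if_pos ((pv_startswith_iff ['0'] c (by decide)).mpr rfl),
            pv_splitOn_pair ['0'] c (by decide) hc]
        rfl
      have hne : ∀ p ∈ rest, p.1.toList ≠ '0' :: '-' :: c := by
        intro p hp hpe
        have : p.1 = kv.1 := String.toList_inj.mp (hpe.trans hm.symm)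
        have hmem : kv.1 ∈ rest.map Prod.fst := this ▸ List.mem_map_of_mem hp
        exact (List.nodup_cons.mp (by simpa using hnd)).1 hmem
      rw [List.foldl_cons, pv_header_none c rest _ hcnt' hne, hstep,
          PySem.Dict.get?_insert_self]
    · rw [List.find?_cons_of_neg (by simp [hm]), List.foldl_cons, ih _ hcnt' hnd']
      cases hfind : rest.find? (fun kv => kv.1.toList == '0' :: '-' :: c) with
      | some p => rfl
      | none =>
        exact pv_stepA1_get?_of_ne h kv c (hcnt kv List.mem_cons_self) hm

lemma pv_header_eq (c : List Char) (l : List (String × String)) (hc : '-' ∉ c)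
    (hcnt : ∀ kv ∈ l, kv.1.toList.count '-' = 1) (hnd : (l.map Prod.fst).Nodup) :
    (l.foldl pvStepA1 PySem.Dict.empty).getD c (['c', 'o', 'l', '_'] ++ c) = pvHeaderB l c := by
  rw [PySem.Dict.getD_eq_get?_getD, pv_header_fold c l hc PySem.Dict.empty hcnt hnd]
  unfold pvHeaderB
  cases l.find? (fun kv => kv.1.toList == '0' :: '-' :: c) <;> simp [PySem.Dict.get?_empty]

-- ===== VERDICT (by name: the statement is the Claim_ definition above) =====
theorem prepare_vactor_data_spec : Claim_equal_prepare_vactor_data := by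
  intro g _ hpre
  obtain ⟨hcnt, hnd⟩ := hpre
  unfold Spec_prepare_vactor_data
  simp only [prepare_vactor_data, prepare_vactor_data_alt]
  set H := g.foldl pvStepA1 PySem.Dict.empty with hH
  set rs := g.foldl (pvStepA2 H) PySem.Dict.empty with hrs
  have hkeys : rs.keys = g.foldl pvSeenStep [] := by
    rw [hrs, pv_keys_fold H g PySem.Dict.empty, PySem.Dict.keys_empty]
  have hndk : rs.keys.Nodup := by
    rw [hkeys]; exact pv_seen_nodup g [] List.nodup_nil
  have hsen : ∀ r ∈ g.foldl pvSeenStep [],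
      PySem.Chars.join [',', ' '] (rs.getD r []) = pvSentence g r := by
    intro r hrmem
    have hr0 : r ≠ ['0'] := pv_seen_ne g [] (by simp) r hrmem
    have hget : rs.getD r [] = (g.filter (pvKeep r)).map (pvFmtA H) := by
      rw [hrs, pv_getD_fold H g PySem.Dict.empty r hr0, PySem.Dict.getD_empty, List.nil_append]
    rw [hget]
    unfold pvSentence
    rw [PySem.List.foldl_append_if
        (fun kv : String × String => ((PySem.Chars.splitOn kv.1.toList ['-']).getD 0 [] == r)
          && (PySem.Chars.strip kv.2.toList != []))
        (fun kv : String × String => pvCap (pvHeaderB g ((PySem.Chars.splitOn kv.1.toList ['-']).getD 1 []))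
          ++ [':', ' '] ++ kv.2.toList) g []]
    rw [List.nil_append]
    congr 1
    have hfil : g.filter (fun kv : String × String =>
        ((PySem.Chars.splitOn kv.1.toList ['-']).getD 0 [] == r)
          && (PySem.Chars.strip kv.2.toList != [])) = g.filter (pvKeep r) := by
      apply List.filter_congr
      intro kv _
      simp [pvKeep, pvRowOf]
    rw [hfil]
    apply List.map_congr_left
    intro kv hkv
    have hkg : kv ∈ g := List.mem_of_mem_filter hkv
    obtain ⟨p0, p1, heq, h0, h1⟩ := pv_count_one_decomp kv.1.toList (hcnt kv hkg)
    have hcol : (PySem.Chars.splitOn kv.1.toList ['-']).getD 1 [] = p1 := by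
      rw [heq, pv_splitOn_pair p0 p1 h0 h1]
      rfl
    simp only [pvFmtA, pvColOf, hcol]
    rw [hH, pv_header_eq p1 g h1 hcnt hnd]
  rw [PySem.Dict.items_eq_map_keys rs hndk [], hkeys, List.map_map]
  apply List.map_congr_left
  intro r hr
  simp only [Function.comp]
  rw [hsen r hr]
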